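-- pv_equiv track=rewrite | github.com/afrikanjoe/Yeet | Google/Python/MatchBraces.py | match_braces
-- ===== SOURCE A (Python) =====
-- def match_braces(s):
--     start = -1
--     end = -1
--     for i in range(len(s)):
--         if(s[i]=='['):
--             start = i
--             break
--     for i in range(len(s)-1,-1,-1):
--         if(s[i]==']'):
--             end = i
--             break
--     return start,end
-- ===== SOURCE B (Python) =====
-- def match_braces(s):
--     # Single forward pass maintaining both indices; no backward scan.
--     start = -1
--     end = -1
--     for i, c in enumerate(s):
--         if start == -1 and c == '[':
--             start = i
--         if c == ']':
--             end = i
--     return start, end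
-- ===== Notes on version B (the rewrite author's own statement) =====
-- stated objective: simpler
-- what changed: Replaces A's two directional scans (forward for first '[' with break, backward for last ']' with break) by one forward pass that keeps both running indices.
import Mathlib
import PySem

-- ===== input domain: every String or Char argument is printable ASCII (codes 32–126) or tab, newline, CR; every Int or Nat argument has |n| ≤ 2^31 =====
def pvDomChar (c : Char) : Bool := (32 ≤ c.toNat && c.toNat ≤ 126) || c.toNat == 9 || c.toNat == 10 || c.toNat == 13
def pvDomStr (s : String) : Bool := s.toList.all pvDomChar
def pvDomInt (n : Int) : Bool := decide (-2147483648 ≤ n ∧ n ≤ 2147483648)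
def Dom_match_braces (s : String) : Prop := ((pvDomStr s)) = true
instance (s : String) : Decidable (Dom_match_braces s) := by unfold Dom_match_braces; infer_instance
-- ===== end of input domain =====

-- B replaces A's two directional scans by one forward pass keeping both indices (simpler decomposition).

-- ===== PORT A =====
-- forward loop: for i in range(len(s)): if s[i]=='[': start=i; break
def pvFindOpen : List Char → Int → Int
  | [], _ => -1
  | c :: cs, i => if c = '[' then i else pvFindOpen cs (i + 1)

-- backward loop: for i in range(len(s)-1,-1,-1): if s[i]==']': end=i; break
-- (transliterated as a scan over the reversed characters with a decreasing index)
def pvFindClose : List Char → Int → Int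
  | [], _ => -1
  | c :: cs, i => if c = ']' then i else pvFindClose cs (i - 1)

def match_braces (s : String) : Int × Int :=
  (pvFindOpen s.toList 0, pvFindClose s.toList.reverse ((s.toList.length : Int) - 1))

-- ===== PORT B =====
def pvScan : List Char → Int → Int × Int → Int × Int
  | [], _, st => st
  | c :: cs, i, (st, en) =>
      pvScan cs (i + 1) ((if st = -1 ∧ c = '[' then i else st), (if c = ']' then i else en))

def match_braces_alt (s : String) : Int × Int :=
  pvScan s.toList 0 (-1, -1)

-- ===== PRECONDITION & SPEC =====
def Spec_match_braces (s : String) (out : Int × Int) : Prop := out = match_braces_alt s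
instance (s : String) (out : Int × Int) : Decidable (Spec_match_braces s out) := by unfold Spec_match_braces; infer_instance

-- ===== CLAIM (what is proved, stated in full; the proofs are below) =====
def Claim_equal_match_braces : Prop := ∀ (s : String), Dom_match_braces s → Spec_match_braces s (match_braces s)

-- ===== LEMMAS AND PROOFS =====

theorem pvScan_fst_fixed (l : List Char) (i st en : Int) (h : st ≠ -1) :
    (pvScan l i (st, en)).1 = st := by
  induction l generalizing i en with
  | nil => rfl
  | cons c cs ih =>
      simp only [pvScan, h, false_and, if_false]
      exact ih _ _

theorem pvScan_fst (l : List Char) (i en : Int) (hi : 0 ≤ i) :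
    (pvScan l i (-1, en)).1 = pvFindOpen l i := by
  induction l generalizing i en with
  | nil => rfl
  | cons c cs ih =>
      by_cases hc : c = '['
      · simp only [pvScan, pvFindOpen, hc, and_true, if_true]
        exact pvScan_fst_fixed _ _ _ _ (by omega)
      · simp only [pvScan, pvFindOpen, hc, and_false, if_false]
        exact ih _ _ (by omega)

theorem pvScan_append (l1 l2 : List Char) (i : Int) (p : Int × Int) :
    pvScan (l1 ++ l2) i p = pvScan l2 (i + l1.length) (pvScan l1 i p) := by
  induction l1 generalizing i p with
  | nil => simp [pvScan]
  | cons c cs ih =>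
      obtain ⟨st, en⟩ := p
      simp only [List.cons_append, pvScan, ih, List.length_cons]
      congr 1
      push_cast
      ring

theorem pvFindClose_none (l : List Char) (i : Int) (h : ']' ∉ l) :
    pvFindClose l i = -1 := by
  induction l generalizing i with
  | nil => rfl
  | cons c cs ih =>
      simp only [List.mem_cons, not_or] at h
      rw [pvFindClose, if_neg (fun hc => h.1 hc.symm)]
      exact ih _ h.2

theorem pvScan_snd (l : List Char) (i st en : Int) :
    (pvScan l i (st, en)).2 =
      if ']' ∈ l then pvFindClose l.reverse (i + l.length - 1) else en := by
  induction l using List.reverseRecOn generalizing i st en with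
  | nil => simp [pvScan]
  | append_singleton l' c ih =>
      rw [pvScan_append]
      by_cases hc : c = ']'
      · subst hc
        simp only [pvScan, List.reverse_append, List.reverse_cons, List.reverse_nil,
          List.nil_append, List.singleton_append, pvFindClose,
          List.mem_append, List.mem_singleton, or_true, if_true, List.length_append,
          List.length_cons, List.length_nil]
        push_cast
        ring
      · simp only [pvScan, List.reverse_append, List.reverse_cons,
          List.reverse_nil, List.nil_append, List.singleton_append, pvFindClose,
          if_neg hc, List.mem_append, List.mem_singleton]
        have hmem : (']' ∈ l' ∨ ']' = c) ↔ ']' ∈ l' := by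
          constructor
          · rintro (h | h)
            · exact h
            · exact absurd h.symm hc
          · exact Or.inl
        rw [if_congr hmem rfl rfl, ih]
        congr 1
        have h1 : ([c] : List Char).length = 1 := rfl
        push_cast [List.length_append, h1]
        ring

theorem match_braces_spec_aux (s : String) : match_braces s = match_braces_alt s := by
  unfold match_braces match_braces_alt
  apply Prod.ext
  · exact (pvScan_fst s.toList 0 (-1) le_rfl).symm
  · rw [pvScan_snd]
    by_cases h : ']' ∈ s.toList
    · simp only [if_pos h]
      congr 1
      ring
    · simp only [if_neg h]
      rw [pvFindClose_none]
      simpa using h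

-- ===== VERDICT (by name: the statement is the Claim_ definition above) =====
theorem match_braces_spec : Claim_equal_match_braces := by
  intro s _
  exact match_braces_spec_aux s
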